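-- pv_equiv track=rewrite | github.com/YoonSungLee/Algorithm_python | 이것이 취업을 위한 코딩테스트다 with 파이썬/DFS_BFS/감시 피하기.py | dfs_left
-- ===== SOURCE A (Python) =====
-- def dfs_left(i, j, current_map):
--     if j < 0:
--         return False
--     else:
--         if current_map[i][j] == 'S':
--             return True
--         elif current_map[i][j] == 'O':
--             return False
--         else:
--             return False or dfs_left(i, j - 1, current_map)
-- ===== SOURCE B (Python) =====
-- def dfs_left(i, j, current_map):
--     while j >= 0:
--         c = current_map[i][j]
--         if c == 'S':
--             return True
--         if c == 'O':
--             return False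
--         j -= 1
--     return False
-- ===== Notes on version B (the rewrite author's own statement) =====
-- stated objective: idiomatic
-- what changed: Replaces the tail recursion (with its redundant 'False or' chaining) by an explicit left-moving while loop that maintains only the current column index.
import Mathlib
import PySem

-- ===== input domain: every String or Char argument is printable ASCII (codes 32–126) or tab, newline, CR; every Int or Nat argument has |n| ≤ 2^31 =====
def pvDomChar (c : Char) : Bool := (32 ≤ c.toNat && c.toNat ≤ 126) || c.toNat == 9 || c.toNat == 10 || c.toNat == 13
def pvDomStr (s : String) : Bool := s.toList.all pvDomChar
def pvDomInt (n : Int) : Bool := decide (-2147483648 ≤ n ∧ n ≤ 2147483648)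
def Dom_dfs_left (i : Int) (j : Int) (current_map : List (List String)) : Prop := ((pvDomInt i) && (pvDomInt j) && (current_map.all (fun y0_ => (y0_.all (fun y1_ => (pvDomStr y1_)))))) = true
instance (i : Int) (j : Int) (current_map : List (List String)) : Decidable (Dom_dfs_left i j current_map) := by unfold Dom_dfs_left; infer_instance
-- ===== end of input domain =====

-- B rewrites A's tail recursion as an explicit left-moving while loop (objective: idiomatic).

-- ===== PORT A =====
-- literal port of A's recursion; 'none' from pyGet? is Python's IndexError, excluded by Pre_
def dfs_left (i : Int) (j : Int) (current_map : List (List String)) : Bool :=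
  if j < 0 then false
  else
    match PySem.List.pyGet? current_map i with
    | none => false   -- Python raises IndexError here (outside Pre_)
    | some row =>
      match PySem.List.pyGet? row j with
      | none => false -- Python raises IndexError here (outside Pre_)
      | some c =>
        if c == "S" then true
        else if c == "O" then false
        else (false || dfs_left i (j - 1) current_map)
termination_by (j + 1).toNat
decreasing_by omega

-- ===== PORT B =====
-- the while loop of Source B: j ≥ 0 counts down; n is the current column index
def dfsLeftLoop (i : Int) (current_map : List (List String)) (n : Nat) : Bool :=
  match (PySem.List.pyGet? current_map i).bind (fun row => PySem.List.pyGet? row (n : Int)) with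
  | none => false   -- Python raises IndexError here (outside Pre_)
  | some c =>
    if c = "S" then true
    else if c = "O" then false
    else
      match n with
      | 0 => false          -- j -= 1 makes j negative: loop exits, return False
      | m + 1 => dfsLeftLoop i current_map m

def dfs_left_alt (i : Int) (j : Int) (current_map : List (List String)) : Bool :=
  if j < 0 then false else dfsLeftLoop i current_map j.toNat

-- ===== PRECONDITION & SPEC =====
-- Pre_ excludes exactly the inputs where Python A raises IndexError: j ≥ 0 with row index i
-- out of (negative-wrapping) range, or column j beyond the row's length.
def Pre_dfs_left (i : Int) (j : Int) (current_map : List (List String)) : Prop :=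
  j < 0 ∨ (PySem.Raise.InRange current_map.length i ∧ j < ((PySem.List.pyGetD current_map i []).length : Int))
instance (i : Int) (j : Int) (current_map : List (List String)) : Decidable (Pre_dfs_left i j current_map) := by unfold Pre_dfs_left; infer_instance

def pvWitness_dfs_left : Int × Int × List (List String) := (0, 1, [["X", "S"]])

def Spec_dfs_left (i : Int) (j : Int) (current_map : List (List String)) (out : Bool) : Prop := out = dfs_left_alt i j current_map
instance (i : Int) (j : Int) (current_map : List (List String)) (out : Bool) : Decidable (Spec_dfs_left i j current_map out) := by unfold Spec_dfs_left; infer_instance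

-- ===== CLAIM (what is proved, stated in full; the proofs are below) =====
def Claim_equal_dfs_left : Prop := ∀ (i : Int) (j : Int) (current_map : List (List String)), Dom_dfs_left i j current_map → Pre_dfs_left i j current_map → Spec_dfs_left i j current_map (dfs_left i j current_map)

-- ===== LEMMAS AND PROOFS =====

lemma dfs_left_key (n : Nat) (i : Int) (current_map : List (List String)) (row : List String)
    (hrow : PySem.List.pyGet? current_map i = some row) (hn : n < row.length) :
    dfs_left i (n : Int) current_map = dfsLeftLoop i current_map n := by
  have hc : PySem.List.pyGet? row ((n : Nat) : Int) = some row[n] := by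
    rw [PySem.List.pyGet?_natCast]; exact List.getElem?_eq_getElem hn
  induction n with
  | zero =>
    rw [dfs_left, dfsLeftLoop]
    simp only [hrow, Option.bind, hc, beq_iff_eq]
    have h0 : ¬ ((0 : Nat) : Int) < 0 := by omega
    rw [if_neg h0]
    split_ifs with h1 h2
    · rfl
    · rfl
    · rw [Bool.false_or, show ((0 : Nat) : Int) - 1 = (-1 : Int) from by norm_num,
          dfs_left, if_pos (show (-1 : Int) < 0 from by norm_num)]
  | succ m ih =>
    rw [dfs_left, dfsLeftLoop]
    simp only [Nat.succ_eq_add_one, hrow, Option.bind, hc, beq_iff_eq]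
    have h0 : ¬ ((m + 1 : Nat) : Int) < 0 := by omega
    rw [if_neg h0]
    split_ifs with h1 h2
    · rfl
    · rfl
    · have hcast : ((m + 1 : Nat) : Int) - 1 = ((m : Nat) : Int) := by push_cast; ring
      rw [hcast, Bool.false_or]
      exact ih (by omega) (by
        rw [PySem.List.pyGet?_natCast]; exact List.getElem?_eq_getElem (by omega))

-- ===== VERDICT (by name: the statement is the Claim_ definition above) =====
theorem dfs_left_spec : Claim_equal_dfs_left := by
  intro i j current_map _ hpre
  unfold Spec_dfs_left dfs_left_alt
  by_cases hj : j < 0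
  · rw [dfs_left, if_pos hj, if_pos hj]
  · rw [if_neg hj]
    rcases hpre with h | ⟨hin, hlen⟩
    · exact absurd h hj
    · obtain ⟨row, hrow⟩ : ∃ row, PySem.List.pyGet? current_map i = some row := by
        rcases h : PySem.List.pyGet? current_map i with _ | row
        · rw [PySem.List.pyGet?_eq_none_iff] at h; exact absurd hin h
        · exact ⟨row, rfl⟩
      have hget : PySem.List.pyGetD current_map i [] = row := by
        simp [PySem.List.pyGetD, hrow]
      rw [hget] at hlen
      have hj' : j = (j.toNat : Int) := by omega
      rw [hj']
      exact dfs_left_key j.toNat i current_map row hrow (by omega)
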